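-- pv_equiv track=rewrite | github.com/bhowmikdham/FIT2004_bhowmik | assignment1.py | compute_time
-- ===== SOURCE A (Python) =====
-- def compute_time(stations, start_idx):
--     '''
--     Compute total_loop_time and list_arrival containing the time at when the friend first arrives at a station based on where he starts from.
--
--     stations: list of (location , travel_time)
--     start_idx: index where the friend starts from in the stations
--
--     Returns:
--         total_loop_time, list_arrival
--
--     Time complexity: O(|T|) here T is number of stations
--     Space complexity: O(|T|)
--     '''
--     #computing total_loop_time
--
--     travel_times= [time for _,time in stations]
--     total_loop_time=sum(travel_times) #O(n) #this is the time that we will be using as a mod divisor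
--
--     #computing time to each station
--     n=len(stations)
--     current_time=0
--     list_arrival = [0] * n
--     idx = start_idx
--     for _ in range(n):
--         list_arrival[idx] = current_time
--         current_time += travel_times[idx]
--         idx = (idx + 1) % n
--
--     return total_loop_time,list_arrival
-- ===== SOURCE B (Python) =====
-- def compute_time(stations, start_idx):
--     # Prefix-sum table + one closed-formula pass instead of a sequential modular walk.
--     prefix = [0]
--     for _, t in stations:
--         prefix.append(prefix[-1] + t)
--     total_loop_time = prefix[-1]
--     n = len(stations)
--     if n == 0:
--         return 0, []
--     s = start_idx % n
--     base = prefix[s]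
--     list_arrival = [prefix[i] - base if i >= s else total_loop_time - base + prefix[i]
--                     for i in range(n)]
--     return total_loop_time, list_arrival
-- ===== Notes on version B (the rewrite author's own statement) =====
-- stated objective: alternative
-- what changed: Replaces the sequential modular walk that writes arrival times station by station with a prefix-sum table plus a per-index closed formula (prefix[i]-prefix[s] or total-prefix[s]+prefix[i]).
import Mathlib
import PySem

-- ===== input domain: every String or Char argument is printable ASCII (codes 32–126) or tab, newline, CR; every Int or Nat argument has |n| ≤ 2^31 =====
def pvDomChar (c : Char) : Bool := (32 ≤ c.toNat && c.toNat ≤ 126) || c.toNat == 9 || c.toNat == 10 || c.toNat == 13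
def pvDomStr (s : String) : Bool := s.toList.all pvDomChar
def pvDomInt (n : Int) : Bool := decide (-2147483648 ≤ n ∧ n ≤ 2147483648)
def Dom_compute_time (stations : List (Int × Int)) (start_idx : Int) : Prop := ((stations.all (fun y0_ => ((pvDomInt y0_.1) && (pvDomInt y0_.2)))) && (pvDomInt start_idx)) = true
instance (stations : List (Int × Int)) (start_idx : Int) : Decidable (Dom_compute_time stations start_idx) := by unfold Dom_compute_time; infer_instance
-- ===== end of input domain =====

-- B replaces A's sequential modular walk by a prefix-sum table with a closed formula per station (alternative decomposition, same cost).

-- ===== PORT A =====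
def compute_time (stations : List (Int × Int)) (start_idx : Int) : Int × List Int :=
  let travel_times := stations.map (fun p => p.2)
  let total_loop_time := travel_times.sum
  let n := stations.length
  let fin := (List.range n).foldl
    (fun (st : List Int × Int × Int) _ =>
      (PySem.List.pySetD st.1 st.2.2 st.2.1,
       st.2.1 + PySem.List.pyGetD travel_times st.2.2 0,
       PySem.Int.mod (st.2.2 + 1) (n : Int)))
    (List.replicate n (0 : Int), (0 : Int), start_idx)
  (total_loop_time, fin.1)

-- ===== PORT B =====
def compute_time_alt (stations : List (Int × Int)) (start_idx : Int) : Int × List Int :=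
  let pref := stations.foldl (fun pr p => pr ++ [PySem.List.pyGetD pr (-1) 0 + p.2]) [(0 : Int)]
  let total_loop_time := PySem.List.pyGetD pref (-1) 0
  let n := stations.length
  if n = 0 then (0, [])
  else
    let s := PySem.Int.mod start_idx (n : Int)
    let base := PySem.List.pyGetD pref s 0
    ((total_loop_time,
      (List.range n).map (fun (i : Nat) =>
        if s ≤ (i : Int) then PySem.List.pyGetD pref ((i : Nat) : Int) 0 - base
        else total_loop_time - base + PySem.List.pyGetD pref ((i : Nat) : Int) 0)))

-- ===== PRECONDITION & SPEC =====
-- Pre_ excludes exactly the inputs where A raises IndexError: a nonempty station list with start_idx outside [-n, n).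
def Pre_compute_time (stations : List (Int × Int)) (start_idx : Int) : Prop :=
  stations = [] ∨ (-(stations.length : Int) ≤ start_idx ∧ start_idx < (stations.length : Int))
instance (stations : List (Int × Int)) (start_idx : Int) : Decidable (Pre_compute_time stations start_idx) := by
  unfold Pre_compute_time; infer_instance
def pvWitness_compute_time : (List (Int × Int)) × Int := ([(0, 3), (5, 2), (9, 4)], 1)

def Spec_compute_time (stations : List (Int × Int)) (start_idx : Int) (out : Int × List Int) : Prop := out = compute_time_alt stations start_idx
instance (stations : List (Int × Int)) (start_idx : Int) (out : Int × List Int) : Decidable (Spec_compute_time stations start_idx out) := by unfold Spec_compute_time; infer_instance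

-- ===== CLAIM (what is proved, stated in full; the proofs are below) =====
def Claim_equal_compute_time : Prop := ∀ (stations : List (Int × Int)) (start_idx : Int), Dom_compute_time stations start_idx → Pre_compute_time stations start_idx → Spec_compute_time stations start_idx (compute_time stations start_idx)
-- ===== LEMMAS AND PROOFS =====

-- prefix sum of the first i travel times
def prefSum (ts : List Int) (i : Nat) : Int := (ts.take i).sum

-- the common closed form of an arrival time (s = normalised start index)
def tgt (ts : List Int) (s j : Nat) : Int :=
  if s ≤ j then prefSum ts j - prefSum ts s
  else prefSum ts ts.length - prefSum ts s + prefSum ts j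

-- A's current_time after m steps of the walk
def ctv (ts : List Int) (s m : Nat) : Int :=
  if s + m ≤ ts.length then prefSum ts (s + m) - prefSum ts s
  else prefSum ts ts.length - prefSum ts s + prefSum ts (s + m - ts.length)

-- A's arrival array after k steps of the walk
def arrK (ts : List Int) (s k : Nat) : List Int :=
  (List.range ts.length).map (fun j => if (s ≤ j ∧ j < s + k) ∨ j + ts.length < s + k then tgt ts s j else 0)

-- A's loop body as a function of the state
def stepF (ts : List Int) (st : List Int × Int × Int) : List Int × Int × Int :=
  (PySem.List.pySetD st.1 st.2.2 st.2.1,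
   st.2.1 + PySem.List.pyGetD ts st.2.2 0,
   PySem.Int.mod (st.2.2 + 1) (ts.length : Int))

lemma foldl_range_iterate {α : Type} (g : α → α) (n : Nat) (init : α) :
    (List.range n).foldl (fun a _ => g a) init = g^[n] init := by
  induction n with
  | zero => rfl
  | succ m ih => rw [List.range_succ, List.foldl_append, ih, Function.iterate_succ_apply']; rfl

lemma prefSum_succ (ts : List Int) (i : Nat) (h : i < ts.length) :
    prefSum ts (i + 1) = prefSum ts i + ts[i] := by
  unfold prefSum
  rw [List.take_add_one, List.sum_append, List.getElem?_eq_getElem h]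
  simp

lemma emod_add_cancel (a n : Int) : (a + n) % n = a % n := by
  have := Int.add_mul_emod_self_left (a := a) (b := n) (c := 1)
  simp only [mul_one] at this
  exact this

lemma emod_succ_emod (a n : Int) : (a % n + 1) % n = (a + 1) % n := by
  conv_lhs => rw [Int.emod_def a n]
  rw [show a - n * (a / n) + 1 = (a + 1) + n * (-(a / n)) by ring, Int.add_mul_emod_self_left]

lemma pySetD_neg (xs : List Int) (k : Nat) (v : Int) (h1 : 0 < k) (h2 : k ≤ xs.length) :
    PySem.List.pySetD xs (-(k : Int)) v = xs.set (xs.length - k) v := by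
  unfold PySem.List.pySetD PySem.List.pySet? PySem.List.pyIdx?
  split_ifs with h <;> simp_all

lemma arrK_one (ts : List Int) (s : Nat) (hs : s < ts.length) :
    arrK ts s 1 = List.replicate ts.length 0 := by
  apply List.ext_getElem
  · simp [arrK]
  · intro j hj hj2
    simp only [arrK, List.getElem_map, List.getElem_range, List.getElem_replicate]
    split_ifs with h
    · rcases h with ⟨h1, h2⟩ | h
      · have : j = s := by omega
        subst this; simp [tgt]
      · omega
    · rfl

lemma ts_getD (ts : List Int) (j : Nat) (hj : j < ts.length) :
    PySem.List.pyGetD ts ((j : Nat) : Int) 0 = ts[j] := by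
  rw [PySem.List.pyGetD_natCast, List.getD_eq_getElem?_getD, List.getElem?_eq_getElem hj]
  rfl

lemma loopA (ts : List Int) (s : Nat) (i0 : Int) (hs : s < ts.length)
    (hi : i0 = (s : Int) ∨ i0 = (s : Int) - ts.length) :
    ∀ k, 1 ≤ k → k ≤ ts.length →
    (stepF ts)^[k] (List.replicate ts.length 0, 0, i0)
      = (arrK ts s k, ctv ts s k, PySem.Int.mod ((s : Int) + k) (ts.length : Int)) := by
  intro k
  induction k with
  | zero => intro h; omega
  | succ k ih =>
    intro _ hk1
    have hn : 0 < ts.length := by omega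
    by_cases hk : k = 0
    · subst hk
      rw [Function.iterate_one]
      unfold stepF
      have harr : PySem.List.pySetD (List.replicate ts.length (0 : Int)) i0 0 = arrK ts s (0 + 1) := by
        rw [arrK_one ts s hs]
        rcases hi with h | h <;> subst h
        · rw [PySem.List.pySetD_natCast]; exact List.set_replicate_self
        · have he : (s : Int) - ts.length = -(((ts.length - s : Nat) : Nat) : Int) := by omega
          rw [he, pySetD_neg _ _ _ (by omega) (by simp)]
          exact List.set_replicate_self
      have hget : PySem.List.pyGetD ts i0 0 = ts[s] := by
        rcases hi with h | h <;> subst h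
        · exact ts_getD ts s hs
        · have he : (s : Int) - ts.length = -(((ts.length - s : Nat) : Nat) : Int) := by omega
          rw [he, PySem.List.pyGetD_neg_natCast _ _ _ (by omega) (by omega)]
          congr 1
          omega
      have hct : (0 : Int) + PySem.List.pyGetD ts i0 0 = ctv ts s (0 + 1) := by
        rw [hget]
        unfold ctv
        rw [if_pos (by omega), prefSum_succ ts s hs]
        ring
      have hidx : PySem.Int.mod (i0 + 1) (ts.length : Int) = PySem.Int.mod ((s : Int) + ((0 : Nat) + 1 : Nat)) (ts.length : Int) := by
        rcases hi with h | h <;> subst h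
        · norm_num
        · rw [PySem.Int.mod_eq_emod_of_pos (by exact_mod_cast hn), PySem.Int.mod_eq_emod_of_pos (by exact_mod_cast hn)]
          push_cast
          rw [show (s : Int) - (ts.length : Int) + 1 = ((s : Int) + 1) + (ts.length : Int) * (-1) by ring, Int.add_mul_emod_self_left]
      rw [harr, hct, hidx]
    · have hk' : 1 ≤ k := by omega
      rw [Function.iterate_succ_apply', ih hk' (by omega)]
      unfold stepF
      simp only []
      set n := ts.length with hn'
      -- the position written this step
      have hcast : PySem.Int.mod ((s : Int) + k) (n : Int) = (((s + k) % n : Nat) : Int) := by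
        rw [show (s : Int) + k = (((s + k : Nat) : Nat) : Int) by push_cast; ring]
        exact PySem.Int.mod_natCast _ _
      set p : Nat := (s + k) % n with hp'
      have hpn : p < n := Nat.mod_lt _ hn
      have hpc : p = s + k ∨ (p = s + k - n ∧ n ≤ s + k) := by
        by_cases hlt : s + k < n
        · left; rw [hp', Nat.mod_eq_of_lt hlt]
        · right
          have h2n : s + k < 2 * n := by omega
          have : (s + k) % n = s + k - n := by
            rw [Nat.mod_eq_sub_mod (by omega), Nat.mod_eq_of_lt (by omega)]
          omega
      have htgtp : tgt ts s p = ctv ts s k := by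
        unfold tgt ctv
        rcases hpc with h | ⟨h, h2⟩
        · rw [if_pos (by omega), if_pos (by omega), h]
        · by_cases hsk : s + k = n
          · have hp0 : p = 0 := by omega
            have hs0 : 0 < s := by omega
            rw [if_neg (by omega), if_pos (by omega), hp0, hsk]
            simp [prefSum, hn', List.take_length]
          · rw [if_neg (by omega), if_neg (by omega), h]
      have harr : PySem.List.pySetD (arrK ts s k) (((s + k) % n : Nat) : Int) (ctv ts s k) = arrK ts s (k + 1) := by
        rw [PySem.List.pySetD_natCast]
        apply List.ext_getElem
        · simp [arrK]
        · intro j hj hj2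
          have hjn : j < n := by simpa [arrK] using hj2
          rw [List.getElem_set]
          simp only [arrK, List.getElem_map, List.getElem_range]
          by_cases hjp : p = j
          · subst hjp
            rw [if_pos rfl, if_pos (by rcases hpc with h | ⟨h, h2⟩ <;> omega)]
            exact htgtp.symm
          · rw [if_neg hjp]
            split_ifs with h1 h2 <;> try rfl
            all_goals (exfalso; rcases hpc with h | ⟨h, h2'⟩ <;> omega)
      have hct : ctv ts s k + PySem.List.pyGetD ts (((s + k) % n : Nat) : Int) 0 = ctv ts s (k + 1) := by
        rw [ts_getD ts p hpn]
        rcases hpc with h | ⟨h, h2⟩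
        · have hlt : s + k < n := by omega
          have hv : ts[p] = ts[s + k]'(by omega) := by simp only [h]
          rw [hv]
          unfold ctv
          rw [if_pos (by omega), if_pos (by omega), show s + (k+1) = (s+k) + 1 by ring, prefSum_succ ts (s+k) (by omega)]
          ring
        · by_cases hsk : s + k = n
          · have hp0 : p = 0 := by omega
            have hv : ts[p] = ts[0]'(by omega) := by simp only [hp0]
            rw [hv]
            unfold ctv
            rw [if_pos (by omega), if_neg (by omega), hsk, show s + (k+1) - n = 1 by omega]
            rw [show (1 : Nat) = 0 + 1 from rfl, prefSum_succ ts 0 (by omega)]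
            simp [prefSum, hn', List.take_length]
          · have hv : ts[p] = ts[s + k - n]'(by omega) := by simp only [h]
            rw [hv]
            unfold ctv
            rw [if_neg (by omega), if_neg (by omega), show s + (k+1) - n = (s + k - n) + 1 by omega, prefSum_succ ts (s+k-n) (by omega)]
            ring
      have hidx : PySem.Int.mod ((((s + k) % n : Nat) : Int) + 1) (n : Int) = PySem.Int.mod ((s : Int) + ((k + 1 : Nat) : Int)) (n : Int) := by
        have hnpos : (0 : Int) < (n : Int) := by exact_mod_cast hn
        rw [PySem.Int.mod_eq_emod_of_pos hnpos, PySem.Int.mod_eq_emod_of_pos hnpos]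
        rw [show (((s + k) % n : Nat) : Int) = ((s + k : Nat) : Int) % (n : Int) by exact_mod_cast Int.natCast_mod _ _]
        rw [emod_succ_emod]
        congr 1
        try ring
      rw [hcast, harr, hct, hidx]

-- B's prefix table is the table of prefSum values
lemma buildPref (stations : List (Int × Int)) :
    stations.foldl (fun pr p => pr ++ [PySem.List.pyGetD pr (-1) 0 + p.2]) [(0 : Int)]
      = (List.range (stations.length + 1)).map (prefSum (stations.map (fun p => p.2))) := by
  induction stations using List.reverseRecOn with
  | nil => simp [prefSum]
  | append_singleton l q ih =>
    rw [List.foldl_append, List.foldl_cons, List.foldl_nil, ih]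
    set ts' := l.map (fun p => p.2) with hts'
    have hlen : ts'.length = l.length := by simp [hts']
    have hts : (l ++ [q]).map (fun p => p.2) = ts' ++ [q.2] := by simp [hts']
    have hlast : PySem.List.pyGetD ((List.range (l.length + 1)).map (prefSum ts')) (-1) 0 = prefSum ts' l.length := by
      rw [List.range_succ, List.map_append, List.map_singleton]
      exact PySem.List.pyGetD_neg_one_append_singleton _ _ _
    rw [hlast, hts]
    have hpref_agree : ∀ i, i ≤ l.length → prefSum (ts' ++ [q.2]) i = prefSum ts' i := by
      intro i hi
      unfold prefSum
      rw [List.take_append_of_le_length (by omega)]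
    apply List.ext_getElem
    · simp
    · intro j hj hj2
      simp only [List.getElem_append, List.getElem_map, List.getElem_range, List.length_map, List.length_range]
      split_ifs with h
      · exact (hpref_agree j (by omega)).symm
      · have hjlen : j < l.length + 1 + 1 := by simpa using hj2
        have hj1 : j = l.length + 1 := by omega
        subst hj1
        simp only [Nat.sub_self, List.getElem_cons_zero]
        unfold prefSum
        rw [show l.length + 1 = (ts' ++ [q.2]).length by simp [hlen], List.take_length,
            show l.length = ts'.length from hlen.symm, List.take_length, List.sum_append]
        simp
  



lemma arrK_full (ts : List Int) (s : Nat) (hs : s < ts.length) :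
    arrK ts s ts.length = (List.range ts.length).map (tgt ts s) := by
  apply List.ext_getElem
  · simp [arrK]
  · intro j hj hj2
    simp only [arrK, List.getElem_map, List.getElem_range]
    have hjn : j < ts.length := by simpa [arrK] using hj
    rw [if_pos (by omega)]

-- the two ports both compute (ts.sum, map (tgt ts s) (range n))
lemma portA_eq (stations : List (Int × Int)) (start_idx : Int) (s : Nat)
    (hs : s < stations.length)
    (hcase : start_idx = (s : Int) ∨ start_idx = (s : Int) - stations.length) :
    compute_time stations start_idx
      = ((stations.map (fun p => p.2)).sum,
         (List.range stations.length).map (tgt (stations.map (fun p => p.2)) s)) := by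
  have hn : 0 < stations.length := by omega
  unfold compute_time
  simp only []
  set ts := stations.map (fun p => p.2) with hts
  have hlen : ts.length = stations.length := by simp [hts]
  rw [foldl_range_iterate (g := fun (st : List Int × Int × Int) =>
      (PySem.List.pySetD st.1 st.2.2 st.2.1,
       st.2.1 + PySem.List.pyGetD ts st.2.2 0,
       PySem.Int.mod (st.2.2 + 1) ((stations.length : Nat) : Int)))]
  have hstep : (fun (st : List Int × Int × Int) =>
      (PySem.List.pySetD st.1 st.2.2 st.2.1,
       st.2.1 + PySem.List.pyGetD ts st.2.2 0,
       PySem.Int.mod (st.2.2 + 1) ((stations.length : Nat) : Int))) = stepF ts := by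
    funext st
    simp [stepF, hlen]
  rw [hstep, show stations.length = ts.length from hlen.symm]
  rw [loopA ts s start_idx (by omega) (by rcases hcase with h | h <;> [left; right] <;> omega)
        ts.length (by omega) (le_refl _)]
  rw [arrK_full ts s (by omega)]

lemma portB_eq (stations : List (Int × Int)) (start_idx : Int) (s : Nat)
    (hs : s < stations.length)
    (hcase : start_idx = (s : Int) ∨ start_idx = (s : Int) - stations.length) :
    compute_time_alt stations start_idx
      = ((stations.map (fun p => p.2)).sum,
         (List.range stations.length).map (tgt (stations.map (fun p => p.2)) s)) := by
  have hn : 0 < stations.length := by omega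
  unfold compute_time_alt
  simp only []
  rw [buildPref stations]
  set ts := stations.map (fun p => p.2) with hts
  have hlen : ts.length = stations.length := by simp [hts]
  have hnpos : (0 : Int) < (stations.length : Int) := by exact_mod_cast hn
  have hmod : PySem.Int.mod start_idx ((stations.length : Nat) : Int) = ((s : Nat) : Int) := by
    rw [PySem.Int.mod_eq_emod_of_pos hnpos]
    rcases hcase with h | h <;> subst h
    · exact Int.emod_eq_of_lt (by omega) (by exact_mod_cast hs)
    · rw [show (s : Int) - stations.length = (s : Int) + (-(stations.length : Int)) by ring]
      rw [show ((s : Int) + -(stations.length : Int)) % (stations.length : Int)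
            = ((s : Int) + -(stations.length : Int) + stations.length) % (stations.length : Int) from (emod_add_cancel _ _).symm]
      rw [show (s : Int) + -(stations.length : Int) + stations.length = (s : Int) by ring]
      exact Int.emod_eq_of_lt (by omega) (by exact_mod_cast hs)
  have htotal : PySem.List.pyGetD ((List.range (stations.length + 1)).map (prefSum ts)) (-1) 0
      = prefSum ts stations.length := by
    rw [List.range_succ, List.map_append, List.map_singleton]
    exact PySem.List.pyGetD_neg_one_append_singleton _ _ _
  have hpref : ∀ i : Nat, i ≤ stations.length →
      PySem.List.pyGetD ((List.range (stations.length + 1)).map (prefSum ts)) ((i : Nat) : Int) 0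
        = prefSum ts i := by
    intro i hi
    rw [PySem.List.pyGetD_natCast]
    exact PySem.List.getD_map_range _ _ _ _ (by omega)
  rw [if_neg (by omega), hmod, htotal, hpref s (by omega)]
  have hsum : prefSum ts stations.length = ts.sum := by
    unfold prefSum
    rw [show stations.length = ts.length from hlen.symm, List.take_length]
  rw [hsum]
  congr 1
  apply List.map_congr_left
  intro i hi
  have hin : i < stations.length := List.mem_range.mp hi
  rw [hpref i (by omega)]
  have hcond : (((s : Nat) : Int) ≤ ((i : Nat) : Int)) ↔ s ≤ i := by exact_mod_cast Iff.rfl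
  unfold tgt
  rw [hlen]
  split_ifs with h1 h2 h2
  · ring
  · exact absurd (hcond.mp h1) h2
  · exact absurd (hcond.mpr h2) h1
  · rw [← hsum]


-- ===== VERDICT (by name: the statement is the Claim_ definition above) =====
theorem compute_time_spec : Claim_equal_compute_time := by
  intro stations start_idx _ hpre
  unfold Spec_compute_time
  by_cases hnil : stations = []
  · subst hnil; rfl
  · have hn : 0 < stations.length := List.length_pos_iff.mpr hnil
    rcases hpre with h | ⟨h1, h2⟩
    · exact absurd h hnil
    obtain ⟨s, hsn, hcase⟩ : ∃ s : Nat, s < stations.length ∧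
        (start_idx = (s : Int) ∨ start_idx = (s : Int) - stations.length) := by
      by_cases h0 : 0 ≤ start_idx
      · exact ⟨start_idx.toNat, by omega, Or.inl (by omega)⟩
      · exact ⟨(start_idx + stations.length).toNat, by omega, Or.inr (by omega)⟩
    rw [portA_eq stations start_idx s hsn hcase, portB_eq stations start_idx s hsn hcase]
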